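-- pv_equiv track=rewrite | github.com/mashikro/code-challenges | smaller_num_count.py | smaller_num_count2
-- ===== SOURCE A (Python) =====
-- def smaller_num_count2(nums):
--
--     counts = {}
--     sorted_nums = sorted(nums) #nlogn
--
--
--     for i in range(len(sorted_nums)):
--         if sorted_nums[i] not in counts:
--             counts[sorted_nums[i]] = i # number : index
--
--     ret = []
--
--     for n in nums: #using original list
--         ret.append(counts[n]) #n is number and counts[n] is index
--
--
--     return ret
-- ===== SOURCE B (Python) =====
-- def smaller_num_count2(nums):
--     # binary search (hand-rolled bisect_left) on the sorted copy instead of a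
--     # precomputed first-index dict
--     sorted_nums = sorted(nums)
--     ret = []
--     for n in nums:
--         lo, hi = 0, len(sorted_nums)
--         while lo < hi:
--             mid = (lo + hi) // 2
--             if sorted_nums[mid] < n:
--                 lo = mid + 1
--             else:
--                 hi = mid
--         ret.append(lo)
--     return ret
-- ===== Notes on version B (the rewrite author's own statement) =====
-- stated objective: alternative
-- what changed: Replaces the dict of first occurrence indices built over the sorted list by a hand-rolled bisect_left binary search on the sorted copy for each element.
import Mathlib
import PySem

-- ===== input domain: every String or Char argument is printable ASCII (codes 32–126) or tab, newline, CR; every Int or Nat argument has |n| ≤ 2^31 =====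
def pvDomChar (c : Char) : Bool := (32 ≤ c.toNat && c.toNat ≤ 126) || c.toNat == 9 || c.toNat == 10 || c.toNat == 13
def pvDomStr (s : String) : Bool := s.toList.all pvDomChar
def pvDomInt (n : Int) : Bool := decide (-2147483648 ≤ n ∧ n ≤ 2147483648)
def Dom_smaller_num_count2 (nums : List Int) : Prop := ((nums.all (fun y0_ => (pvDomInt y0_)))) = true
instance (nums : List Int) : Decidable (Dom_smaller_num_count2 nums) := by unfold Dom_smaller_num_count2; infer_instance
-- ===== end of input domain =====

-- B replaces A's first-index dict over the sorted list by a hand-rolled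
-- bisect_left binary search on the sorted copy (alternative algorithm, same cost).


-- ===== PORT A =====
-- counts[n] in the final loop never misses (every n ∈ nums is a key), so it is
-- ported as getD with an arbitrary default.
def smaller_num_count2 (nums : List Int) : List Int :=
  let sorted_nums := PySem.List.sorted nums (fun x => x) false
  let counts : PySem.Dict Int Int :=
    (PySem.List.pyRange 0 (PySem.List.len sorted_nums) 1).foldl
      (fun c i =>
        if c.contains (PySem.List.pyGetD sorted_nums i 0) then c
        else c.insert (PySem.List.pyGetD sorted_nums i 0) i)
      PySem.Dict.empty
  nums.foldl (fun ret n => ret ++ [counts.getD n 0]) []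

-- ===== PORT B =====
-- the while-loop of Source B: lo/hi binary search, mid = (lo + hi) // 2
def pvBisect (s : List Int) (n lo hi : Int) : Int :=
  if _h : lo < hi then
    let mid := PySem.Int.floordiv (lo + hi) 2
    if PySem.List.pyGetD s mid 0 < n then pvBisect s n (mid + 1) hi
    else pvBisect s n lo mid
  else lo
termination_by (hi - lo).toNat
decreasing_by
  · simp only [PySem.Int.floordiv, Int.fdiv_eq_ediv] at *; omega
  · simp only [PySem.Int.floordiv, Int.fdiv_eq_ediv] at *; omega

def smaller_num_count2_alt (nums : List Int) : List Int :=
  let sorted_nums := PySem.List.sorted nums (fun x => x) false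
  nums.foldl (fun ret n => ret ++ [pvBisect sorted_nums n 0 (PySem.List.len sorted_nums)]) []

-- ===== PRECONDITION & SPEC =====
def Spec_smaller_num_count2 (nums : List Int) (out : List Int) : Prop := out = smaller_num_count2_alt nums
instance (nums : List Int) (out : List Int) : Decidable (Spec_smaller_num_count2 nums out) := by unfold Spec_smaller_num_count2; infer_instance

-- ===== CLAIM (what is proved, stated in full; the proofs are below) =====
def Claim_equal_smaller_num_count2 : Prop := ∀ (nums : List Int), Dom_smaller_num_count2 nums → Spec_smaller_num_count2 nums (smaller_num_count2 nums)

-- ===== LEMMAS AND PROOFS =====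

-- in a ≤-sorted list, the elements < x are exactly the first countP (· < x) ones
theorem pvSortedChar (s : List Int) (x : Int) (hs : List.Pairwise (· ≤ ·) s) :
    ∀ (j : Nat) (hj : j < s.length),
      (s[j] < x ↔ j < s.countP (fun y => decide (y < x))) := by
  induction s with
  | nil => intro j hj; simp at hj
  | cons a t ih =>
      obtain ⟨ha, ht⟩ := List.pairwise_cons.mp hs
      intro j hj
      by_cases hax : a < x
      · have hcnt : (a :: t).countP (fun y => decide (y < x))
            = t.countP (fun y => decide (y < x)) + 1 := by
          simp [List.countP_cons, hax]
        cases j with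
        | zero => simp [hcnt, hax]
        | succ j =>
            have hj' : j < t.length := by simpa using hj
            have := ih ht j hj'
            simpa [hcnt] using this
      · have hzero : t.countP (fun y => decide (y < x)) = 0 := by
          rw [List.countP_eq_zero]
          intro y hy
          have := ha y hy
          simp only [decide_eq_true_eq]
          omega
        have hcnt : (a :: t).countP (fun y => decide (y < x)) = 0 := by
          simp [List.countP_cons, hax, hzero]
        cases j with
        | zero => simp [hcnt, hax]
        | succ j =>
            have hj' : j < t.length := by simpa using hj
            have hge : a ≤ t[j] := ha _ (List.getElem_mem hj')
            simp only [List.getElem_cons_succ, hcnt]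
            omega

-- the first index of a present value, characterised
theorem pvIdxOfEq (l : List Int) (n : Int) (c : Nat) (hc : c < l.length)
    (hl : l[c] = n) (hj : ∀ (j : Nat) (h : j < c), l[j] ≠ n) : l.idxOf n = c := by
  induction l generalizing c with
  | nil => simp at hc
  | cons a t ih =>
      cases c with
      | zero =>
          simp only [List.getElem_cons_zero] at hl
          subst hl; exact List.idxOf_cons_self
      | succ c =>
          have hne : a ≠ n := by
            have := hj 0 (Nat.succ_pos c)
            simpa using this
          rw [List.idxOf_cons_ne _ hne]
          have hc' : c < t.length := by simpa using hc
          have hl' : t[c] = n := by simpa using hl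
          have hj' : ∀ (j : Nat) (h : j < c), t[j] ≠ n := by
            intro j h
            have := hj (j + 1) (by omega)
            simpa using this
          rw [ih c hc' hl' hj']

-- in a ≤-sorted list, the first index of a present value is countP (· < n)
theorem pvIdxOfSorted (s : List Int) (hs : List.Pairwise (· ≤ ·) s) (n : Int)
    (hn : n ∈ s) : s.idxOf n = s.countP (fun y => decide (y < n)) := by
  set c := s.countP (fun y => decide (y < n)) with hcdef
  obtain ⟨p, hp, hpe⟩ := List.getElem_of_mem hn
  have hpc : ¬ p < c := by
    intro h
    have := (pvSortedChar s n hs p hp).mpr h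
    omega
  have hclen : c < s.length := by omega
  have hnotlt : ¬ s[c] < n := by
    intro h
    have := (pvSortedChar s n hs c hclen).mp h
    omega
  have hle : s[c] ≤ n := by
    rcases Nat.lt_or_ge c p with h | h
    · have := List.pairwise_iff_getElem.mp hs c p hclen hp h
      omega
    · rcases Nat.eq_or_lt_of_le h with h' | h'
      · simp [← h', hpe]
      · have := List.pairwise_iff_getElem.mp hs p c hp hclen h'
        omega
  have hceq : s[c] = n := by omega
  exact pvIdxOfEq s n c hclen hceq (fun j hj =>
    by
      have := (pvSortedChar s n hs j (by omega)).mpr hj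
      omega)

-- the fold step of A's dict-building loop, on (index, value) pairs
def pvStep (c : PySem.Dict Int Int) (p : Int × Int) : PySem.Dict Int Int :=
  if c.contains p.2 then c else c.insert p.2 p.1

theorem pvBuildStable (t : List Int) (k : Int) (d : PySem.Dict Int Int) (n : Int)
    (h : d.contains n = true) :
    ((PySem.List.enumerate t k).foldl pvStep d).get? n = d.get? n := by
  induction t generalizing k d with
  | nil => simp [PySem.List.enumerate]
  | cons a t ih =>
      simp only [PySem.List.enumerate, List.foldl_cons]
      by_cases hca : d.contains a = true
      · rw [show pvStep d (k, a) = d from by simp [pvStep, hca]]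
        exact ih (k + 1) d h
      · have hne : n ≠ a := by intro he; rw [he] at h; simp [h] at hca
        have hstep : pvStep d (k, a) = d.insert a k := by
          simp [pvStep, hca]
        rw [hstep, ih (k + 1) _ (by simp [PySem.Dict.contains_insert, h])]
        rw [PySem.Dict.get?_insert]
        simp [hne]

theorem pvBuildFirst (t : List Int) (k : Int) (d : PySem.Dict Int Int) (n : Int)
    (hc : d.contains n = false) (hn : n ∈ t) :
    ((PySem.List.enumerate t k).foldl pvStep d).get? n = some (k + (t.idxOf n : Int)) := by
  induction t generalizing k d with
  | nil => simp at hn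
  | cons a t ih =>
      simp only [PySem.List.enumerate, List.foldl_cons]
      by_cases hna : n = a
      · subst hna
        have hstep : pvStep d (k, n) = d.insert n k := by simp [pvStep, hc]
        rw [hstep]
        rw [pvBuildStable t (k + 1) _ n (by simp [PySem.Dict.contains_insert])]
        rw [PySem.Dict.get?_insert]
        simp [List.idxOf_cons_self]
      · have hnt : n ∈ t := by
          rcases List.mem_cons.mp hn with h | h
          · exact absurd h hna
          · exact h
        have hidx : (a :: t).idxOf n = (t.idxOf n) + 1 := by
          rw [List.idxOf_cons_ne _ (fun h => hna h.symm)]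
        by_cases hca : d.contains a = true
        · rw [show pvStep d (k, a) = d from by simp [pvStep, hca]]
          rw [ih (k + 1) d hc hnt, hidx]
          congr 1
          push_cast
          ring
        · have hstep : pvStep d (k, a) = d.insert a k := by simp [pvStep, hca]
          rw [hstep]
          have hc' : (d.insert a k).contains n = false := by
            simp [PySem.Dict.contains_insert, hc, hna]
          rw [ih (k + 1) _ hc' hnt, hidx]
          congr 1
          push_cast
          ring

theorem pvFloordivTwo (a : Int) : PySem.Int.floordiv a 2 = a / 2 := by
  unfold PySem.Int.floordiv
  rw [Int.fdiv_eq_ediv]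
  norm_num

-- B's binary search, on a ≤-sorted list, maintains lo ≤ countP < ≤ hi and returns it
theorem pvBisectEq (s : List Int) (hs : List.Pairwise (· ≤ ·) s) (n : Int) :
    ∀ (lo hi : Int), 0 ≤ lo → hi ≤ (s.length : Int) →
      lo ≤ (s.countP (fun y => decide (y < n)) : Int) →
      (s.countP (fun y => decide (y < n)) : Int) ≤ hi →
      pvBisect s n lo hi = (s.countP (fun y => decide (y < n)) : Int) := by
  intro lo hi
  induction lo, hi using pvBisect.induct s n with
  | case1 lo hi hlt mid hmidlt ih =>
      intro h0 hlen hlc hch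
      rw [pvBisect]
      simp only [hlt, dite_true]
      rw [show PySem.Int.floordiv (lo + hi) 2 = mid from rfl]
      simp only [hmidlt, if_true]
      have hmid : mid = (lo + hi) / 2 := pvFloordivTwo (lo + hi)
      have hmb : lo ≤ mid ∧ mid < hi := by omega
      have hmem : PySem.List.pyGetD s mid 0 = s[mid.toNat] := by
        exact PySem.List.pyGetD_eq_getElem s 0 (by omega) (by omega)
      rw [hmem] at hmidlt
      have := (pvSortedChar s n hs mid.toNat (by omega)).mp hmidlt
      exact ih (by omega) hlen (by omega) hch
  | case2 lo hi hlt mid hmidge ih =>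
      intro h0 hlen hlc hch
      rw [pvBisect]
      simp only [hlt, dite_true]
      rw [show PySem.Int.floordiv (lo + hi) 2 = mid from rfl]
      simp only [hmidge, if_false]
      have hmid : mid = (lo + hi) / 2 := pvFloordivTwo (lo + hi)
      have hmb : lo ≤ mid ∧ mid < hi := by omega
      have hmem : PySem.List.pyGetD s mid 0 = s[mid.toNat] := by
        exact PySem.List.pyGetD_eq_getElem s 0 (by omega) (by omega)
      rw [hmem] at hmidge
      have hiff := pvSortedChar s n hs mid.toNat (by omega)
      have : ¬ (mid.toNat < s.countP (fun y => decide (y < n))) := by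
        intro h
        exact hmidge (hiff.mpr h)
      exact ih h0 (by omega) hlc (by omega)
  | case3 lo hi hge =>
      intro h0 hlen hlc hch
      rw [pvBisect]
      simp only [hge, dite_false]
      omega

-- ===== VERDICT (by name: the statement is the Claim_ definition above) =====
theorem smaller_num_count2_spec : Claim_equal_smaller_num_count2 := by
  intro nums _
  unfold Spec_smaller_num_count2 smaller_num_count2 smaller_num_count2_alt
  simp only [PySem.List.foldl_append_singleton_eq_map, List.nil_append]
  set s := PySem.List.sorted nums (fun x => x) false with hsdef
  have hs : List.Pairwise (· ≤ ·) s := PySem.List.sorted_pairwise nums (fun x => x)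
  apply List.map_congr_left
  intro n hn
  have hns : n ∈ s := (PySem.List.mem_sorted nums (fun x => x) false n).mpr hn
  -- rewrite A's pyRange fold as a fold over enumerate s
  have hb :
      (PySem.List.pyRange 0 (PySem.List.len s) 1).foldl
        (fun c i =>
          if c.contains (PySem.List.pyGetD s i 0) then c
          else c.insert (PySem.List.pyGetD s i 0) i)
        PySem.Dict.empty
      = (PySem.List.enumerate s 0).foldl pvStep PySem.Dict.empty := by
    rw [PySem.List.enumerate_eq_map_pyRange s 0, List.foldl_map]
    rfl
  rw [hb, PySem.Dict.getD_eq_get?_getD,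
      pvBuildFirst s 0 PySem.Dict.empty n (by simp) hns]
  simp only [Option.getD_some, zero_add]
  rw [pvIdxOfSorted s hs n hns]
  rw [pvBisectEq s hs n 0 (PySem.List.len s) le_rfl
        (by simp [PySem.List.len]) (by positivity)
        (by simp [PySem.List.len]; exact_mod_cast List.countP_le_length)]
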